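-- pv_equiv track=rewrite | github.com/lishuhuakai/CS | CS262_Building_A_Web_Browser/chap03/hw/Infinite_Mind_Reading.py | cfginfiniteEx
-- ===== SOURCE A (Python) =====
-- def cfginfiniteEx(grammar):
--       for Q in [rule[0] for rule in grammar]:
--             # See if Q can be rewritten to xQy
--             def helper(current, visited, sizexy):
--                   if current in visited:
--                         return sizexy > 0
--                   else:
--                         new_visited = visited + [current]
--                         for rhs in [rule[1] for rule in grammar if rule[0] == current]:
--                               for symbol in rhs:
--                                     if helper(symbol, new_visited, sizexy + len(rhs) - 1):
--                                           return True
--                         return False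
--             if helper(Q, [], 0):
--                   return True
--       return False
-- ===== SOURCE B (Python) =====
-- def cfginfiniteEx(grammar):
--     for Q in [rule[0] for rule in grammar]:
--         # explicit stack-based DFS instead of the recursive helper
--         stack = [(Q, [], 0)]
--         while stack:
--             current, visited, sizexy = stack.pop()
--             if current in visited:
--                 if sizexy > 0:
--                     return True
--             else:
--                 new_visited = visited + [current]
--                 for rule in grammar:
--                     if rule[0] == current:
--                         rhs = rule[1]
--                         for symbol in rhs:
--                             stack.append((symbol, new_visited, sizexy + len(rhs) - 1))
--     return False
-- ===== Notes on version B (the rewrite author's own statement) =====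
-- stated objective: alternative
-- what changed: A's nested recursive helper (per-path visited list, accumulated len(rhs)-1 weight) is replaced by an explicit stack-based DFS that pops (symbol, path, weight) frames and pushes child frames, with no recursion.
import Mathlib
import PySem

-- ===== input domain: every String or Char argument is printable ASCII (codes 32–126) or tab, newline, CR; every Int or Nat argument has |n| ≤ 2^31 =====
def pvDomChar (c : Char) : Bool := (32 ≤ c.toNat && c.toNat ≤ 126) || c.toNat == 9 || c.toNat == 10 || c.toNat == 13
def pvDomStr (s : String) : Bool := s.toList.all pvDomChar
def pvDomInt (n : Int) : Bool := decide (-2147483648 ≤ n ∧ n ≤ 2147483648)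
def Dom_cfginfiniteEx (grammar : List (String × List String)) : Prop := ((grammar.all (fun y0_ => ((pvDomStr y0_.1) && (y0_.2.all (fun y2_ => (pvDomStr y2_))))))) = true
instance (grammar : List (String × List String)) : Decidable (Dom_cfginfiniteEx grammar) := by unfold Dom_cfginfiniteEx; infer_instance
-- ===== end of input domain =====

-- B replaces A's nested recursive helper by an explicit stack-based DFS over (symbol, path, weight) frames (different decomposition, same cost).

-- all symbols occurring in the grammar (lhs and rhs); used only as the termination measure of helperA and the fuel of the B loop
def pvAllSyms (g : List (String × List String)) : List String :=
  g.map (fun r => r.1) ++ g.flatMap (fun r => r.2)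

-- number of grammar symbols not yet on the path: the recursion/loop depth measure
def pvMu (g : List (String × List String)) (v : List String) : Nat :=
  ((pvAllSyms g).filter (fun x => decide (x ∉ v))).length

-- generic: a filter by a pointwise-stronger predicate that newly rejects a member is strictly shorter
theorem pvFilterLtAux (c : String) (v : List String) (l : List String) (hc : c ∈ l) (hv : c ∉ v) :
    (l.filter (fun x => decide (x ∉ v ++ [c]))).length < (l.filter (fun x => decide (x ∉ v))).length := by
  induction l with
  | nil => cases hc
  | cons a tl ih =>
    rcases List.mem_cons.mp hc with rfl | h
    · simp only [List.filter_cons]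
      have h1 : (decide (c ∉ v ++ [c])) = false := by simp
      have h2 : (decide (c ∉ v)) = true := by simpa using hv
      rw [h1, h2]
      have hle : (tl.filter (fun x => decide (x ∉ v ++ [c]))).length ≤ (tl.filter (fun x => decide (x ∉ v))).length := by
        apply List.Sublist.length_le
        apply List.monotone_filter_right
        intro x hx
        simp only [decide_eq_true_eq, List.mem_append, List.mem_singleton] at hx ⊢
        exact fun h => hx (Or.inl h)
      simpa using Nat.lt_succ_of_le hle
    · have := ih h
      simp only [List.filter_cons]
      by_cases ha2 : a ∉ v ++ [c]
      · have ha1 : a ∉ v := fun hm => ha2 (List.mem_append.mpr (Or.inl hm))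
        simp only [ha1, ha2]
        simpa using Nat.succ_lt_succ this
      · by_cases ha1 : a ∉ v
        · simp only [ha1, ha2, decide_false]
          simpa using Nat.lt_succ_of_lt this
        · simp only [ha1, ha2, decide_false]
          simpa using this

theorem pvMu_lt (g : List (String × List String)) (c : String) (v : List String)
    (hc : c ∈ pvAllSyms g) (hv : c ∉ v) : pvMu g (v ++ [c]) < pvMu g v :=
  pvFilterLtAux c v (pvAllSyms g) hc hv

-- ===== PORT A =====
-- A's recursive helper; `attach` only carries the membership fact needed for termination
def pvHelperA (g : List (String × List String)) (current : String) (visited : List String) (sizexy : Int) : Bool :=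
  if current ∈ visited then decide (sizexy > 0)
  else
    ((g.filter (fun r => r.1 == current)).attach).any (fun rule =>
      rule.1.2.any (fun symbol =>
        pvHelperA g symbol (visited ++ [current]) (sizexy + (rule.1.2.length : Int) - 1)))
termination_by pvMu g visited
decreasing_by
  apply pvMu_lt
  · have hr := rule.2
    have hm := List.mem_filter.mp hr
    have : rule.1.1 = current := by simpa using hm.2
    exact List.mem_append.mpr (Or.inl (this ▸ List.mem_map_of_mem hm.1))
  · assumption

def cfginfiniteEx (grammar : List (String × List String)) : Bool :=
  (grammar.map (fun rule => rule.1)).any (fun Q => pvHelperA grammar Q [] 0)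

-- ===== PORT B =====
-- the frames pushed when expanding (current, visited, sizexy): rule order, then symbol order
def pvChildren (g : List (String × List String)) (current : String) (visited : List String) (sizexy : Int) :
    List (String × List String × Int) :=
  (g.filter (fun r => r.1 == current)).flatMap (fun rule =>
    rule.2.map (fun symbol => (symbol, visited ++ [current], sizexy + (rule.2.length : Int) - 1)))

-- the while-loop over the explicit stack (head = top; fuel only makes the loop total and is never exhausted)
def pvLoopB (g : List (String × List String)) : Nat → List (String × List String × Int) → Bool
  | _, [] => false
  | 0, _ :: _ => false
  | n + 1, (current, visited, sizexy) :: rest =>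
    if current ∈ visited then
      if sizexy > 0 then true else pvLoopB g n rest
    else
      pvLoopB g n ((pvChildren g current visited sizexy).foldl (fun st fr => fr :: st) rest)

def pvFuel (g : List (String × List String)) : Nat :=
  ((g.flatMap (fun r => r.2)).length + 1) ^ (pvAllSyms g).length

def cfginfiniteEx_alt (grammar : List (String × List String)) : Bool :=
  (grammar.map (fun rule => rule.1)).any (fun Q => pvLoopB grammar (pvFuel grammar) [(Q, [], 0)])

-- ===== PRECONDITION & SPEC =====
def Spec_cfginfiniteEx (grammar : List (String × List String)) (out : Bool) : Prop := out = cfginfiniteEx_alt grammar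
instance (grammar : List (String × List String)) (out : Bool) : Decidable (Spec_cfginfiniteEx grammar out) := by unfold Spec_cfginfiniteEx; infer_instance

-- ===== CLAIM (what is proved, stated in full; the proofs are below) =====
def Claim_equal_cfginfiniteEx : Prop := ∀ (grammar : List (String × List String)), Dom_cfginfiniteEx grammar → Spec_cfginfiniteEx grammar (cfginfiniteEx grammar)

-- ===== LEMMAS AND PROOFS =====

-- helperA at an already-visited symbol just tests the accumulated weight
theorem pvHelperA_mem (g : List (String × List String)) (c : String) (v : List String) (s : Int)
    (h : c ∈ v) : pvHelperA g c v s = decide (s > 0) := by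
  rw [pvHelperA]; simp [h]

-- helperA in the expansion case is `any` over the pushed child frames
theorem pvHelperA_else (g : List (String × List String)) (c : String) (v : List String) (s : Int)
    (h : c ∉ v) :
    pvHelperA g c v s = (pvChildren g c v s).any (fun fr => pvHelperA g fr.1 fr.2.1 fr.2.2) := by
  rw [pvHelperA]
  simp only [h, if_false, pvChildren]
  rw [Bool.eq_iff_iff]
  simp only [List.any_eq_true, List.mem_attach, List.mem_flatMap, List.mem_map, Subtype.exists,
    true_and]
  constructor
  · rintro ⟨rule, hr, sym, hs, hh⟩
    exact ⟨_, ⟨rule, hr, sym, hs, rfl⟩, hh⟩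
  · rintro ⟨fr, ⟨rule, hr, sym, hs, rfl⟩, hh⟩
    exact ⟨rule, hr, sym, hs, hh⟩

theorem pvFoldlCons {α : Type} (l acc : List α) :
    l.foldl (fun st fr => fr :: st) acc = l.reverse ++ acc := by
  induction l generalizing acc with
  | nil => rfl
  | cons a tl ih => simp [List.foldl_cons, ih]

-- every child frame carries the path v ++ [c]
theorem pvChildren_visited (g : List (String × List String)) (c : String) (v : List String) (s : Int)
    (fr : String × List String × Int) (h : fr ∈ pvChildren g c v s) : fr.2.1 = v ++ [c] := by
  simp only [pvChildren, List.mem_flatMap, List.mem_map] at h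
  rcases h with ⟨rule, _, sym, _, rfl⟩
  rfl

theorem pvChildren_length (g : List (String × List String)) (c : String) (v : List String) (s : Int) :
    (pvChildren g c v s).length ≤ (g.flatMap (fun r => r.2)).length := by
  induction g with
  | nil => simp [pvChildren]
  | cons r tl ih =>
    simp only [pvChildren, List.filter_cons, List.flatMap_cons] at *
    by_cases hr : (r.1 == c) = true
    · simp only [hr, if_true, List.flatMap_cons, List.length_append, List.length_map]
      exact Nat.add_le_add_left ih _
    · simp only [hr, List.length_append]
      exact Nat.le_add_left_of_le ih

theorem pvSumConst {α : Type} (l : List α) (f : α → Nat) (k : Nat) (h : ∀ x ∈ l, f x = k) :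
    (l.map f).sum = l.length * k := by
  induction l with
  | nil => simp
  | cons a tl ih =>
    simp only [List.map_cons, List.sum_cons, List.length_cons]
    rw [h a (List.mem_cons_self), ih (fun x hx => h x (List.mem_cons_of_mem _ hx))]
    ring

-- if children are nonempty then c is a grammar symbol
theorem pvChildren_ne_nil_mem (g : List (String × List String)) (c : String) (v : List String) (s : Int)
    (h : pvChildren g c v s ≠ []) : c ∈ pvAllSyms g := by
  rcases List.exists_mem_of_ne_nil _ h with ⟨fr, hfr⟩
  simp only [pvChildren, List.mem_flatMap, List.mem_map] at hfr
  rcases hfr with ⟨rule, hr, _, _, _⟩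
  have hm := List.mem_filter.mp hr
  have : rule.1 = c := by simpa using hm.2
  exact List.mem_append.mpr (Or.inl (this ▸ List.mem_map_of_mem hm.1))

-- the pushed frames together weigh strictly less than the popped frame
theorem pvChildren_sum (g : List (String × List String)) (c : String) (v : List String) (s : Int)
    (hv : c ∉ v) :
    ((pvChildren g c v s).map
        (fun fr => ((g.flatMap (fun r => r.2)).length + 1) ^ pvMu g fr.2.1)).sum + 1
      ≤ ((g.flatMap (fun r => r.2)).length + 1) ^ pvMu g v := by
  set S := (g.flatMap (fun r => r.2)).length with hS
  by_cases hne : pvChildren g c v s = []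
  · simp [hne, Nat.one_le_pow]
  · have hc : c ∈ pvAllSyms g := pvChildren_ne_nil_mem g c v s hne
    have hlt : pvMu g (v ++ [c]) < pvMu g v := pvMu_lt g c v hc hv
    have hsum : ((pvChildren g c v s).map
        (fun fr => (S + 1) ^ pvMu g fr.2.1)).sum
        = (pvChildren g c v s).length * (S + 1) ^ pvMu g (v ++ [c]) := by
      apply pvSumConst
      intro fr hfr
      rw [pvChildren_visited g c v s fr hfr]
    rw [hsum]
    have hlen := pvChildren_length g c v s
    calc (pvChildren g c v s).length * (S + 1) ^ pvMu g (v ++ [c]) + 1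
        ≤ S * (S + 1) ^ pvMu g (v ++ [c]) + (S + 1) ^ pvMu g (v ++ [c]) := by
          have h1 : (1:Nat) ≤ (S + 1) ^ pvMu g (v ++ [c]) := Nat.one_le_pow _ _ (Nat.succ_pos _)
          exact Nat.add_le_add (Nat.mul_le_mul_right _ hlen) h1
      _ = (S + 1) ^ (pvMu g (v ++ [c]) + 1) := by ring
      _ ≤ (S + 1) ^ pvMu g v := Nat.pow_le_pow_right (Nat.succ_pos _) hlt

-- main invariant: with enough fuel the stack loop decides `any helperA` over the stack
theorem pvLoop_eq (g : List (String × List String)) :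
    ∀ (f : Nat) (st : List (String × List String × Int)),
      (st.map (fun fr => ((g.flatMap (fun r => r.2)).length + 1) ^ pvMu g fr.2.1)).sum ≤ f →
      pvLoopB g f st = st.any (fun fr => pvHelperA g fr.1 fr.2.1 fr.2.2) := by
  intro f
  induction f with
  | zero =>
    intro st hst
    cases st with
    | nil => simp [pvLoopB]
    | cons fr rest =>
      exfalso
      simp only [List.map_cons, List.sum_cons, Nat.le_zero] at hst
      have h1 : (1:Nat) ≤ ((g.flatMap (fun r => r.2)).length + 1) ^ pvMu g fr.2.1 :=
        Nat.one_le_pow _ _ (Nat.succ_pos _)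
      omega
  | succ n ih =>
    intro st hst
    cases st with
    | nil => simp [pvLoopB]
    | cons fr rest =>
      obtain ⟨c, v, s⟩ := fr
      simp only [List.map_cons, List.sum_cons] at hst
      have h1 : (1:Nat) ≤ ((g.flatMap (fun r => r.2)).length + 1) ^ pvMu g v :=
        Nat.one_le_pow _ _ (Nat.succ_pos _)
      by_cases hv : c ∈ v
      · rw [pvLoopB]
        simp only [hv, if_true]
        have hrest : pvLoopB g n rest = rest.any (fun fr => pvHelperA g fr.1 fr.2.1 fr.2.2) :=
          ih rest (by omega)
        by_cases hs : s > 0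
        · simp [List.any_cons, pvHelperA_mem g c v s hv, hs]
        · simp [List.any_cons, pvHelperA_mem g c v s hv, hs, hrest]
      · rw [pvLoopB]
        simp only [hv, if_false]
        rw [pvFoldlCons]
        have hcs := pvChildren_sum g c v s hv
        have hsum : ((((pvChildren g c v s).reverse ++ rest)).map
            (fun fr => ((g.flatMap (fun r => r.2)).length + 1) ^ pvMu g fr.2.1)).sum ≤ n := by
          simp only [List.map_append, List.sum_append, List.map_reverse, List.sum_reverse]
          omega
        rw [ih _ hsum]
        simp [List.any_cons, List.any_append, List.any_reverse, pvHelperA_else g c v s hv]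

-- ===== VERDICT (by name: the statement is the Claim_ definition above) =====
theorem cfginfiniteEx_spec : Claim_equal_cfginfiniteEx := by
  intro grammar _
  unfold Spec_cfginfiniteEx cfginfiniteEx cfginfiniteEx_alt
  refine List.any_congr rfl (fun Q => ?_)
  have h := pvLoop_eq grammar (pvFuel grammar) [(Q, [], 0)] (by
    simp only [List.map_cons, List.map_nil, List.sum_cons, List.sum_nil, Nat.add_zero]
    unfold pvFuel pvMu
    apply Nat.pow_le_pow_right (Nat.succ_pos _)
    simp)
  rw [h]
  simp
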